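-- pv_equiv track=rewrite | github.com/shah1398/Sub_Checker | cl1560.py | process_country
-- ===== SOURCE A (Python) =====
-- def detect_protocol(line):
--     l = line.lower()
--     for p in ["vmess://", "vless://", "trojan://", "ss://", "ssr://",
--               "hy2://", "hysteria2://", "tuic://", "wireguard://", "wg://", "socks://"]:
--         if l.startswith(p):
--             return p.replace("://", "")
--     return "other"
--
-- def process_country(country, lines):
--     proto_map = {}
--
--     for line in lines:
--         proto = detect_protocol(line)
--         proto_map.setdefault(proto, []).append(line)
--
--     # خروجی نهایی متنی
--     out = []
--
--     for proto in sorted(proto_map.keys()):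
--         for line in proto_map[proto]:
--             out.append(line)
--
--     return out
-- ===== SOURCE B (Python) =====
-- def detect_protocol(line):
--     l = line.lower()
--     for p in ["vmess://", "vless://", "trojan://", "ss://", "ssr://",
--               "hy2://", "hysteria2://", "tuic://", "wireguard://", "wg://", "socks://"]:
--         if l.startswith(p):
--             return p.replace("://", "")
--     return "other"
--
-- # the full bucket-name alphabet, pre-sorted alphabetically
-- _ORDER = ["hy2", "hysteria2", "other", "socks", "ss", "ssr",
--           "trojan", "tuic", "vless", "vmess", "wg", "wireguard"]
--
-- def process_country(country, lines):
--     out = []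
--     for proto in _ORDER:
--         for line in lines:
--             if detect_protocol(line) == proto:
--                 out.append(line)
--     return out
-- ===== Notes on version B (the rewrite author's own statement) =====
-- stated objective: alternative
-- what changed: Replaced the bucket-dict build plus sorted-keys emission with twelve filter passes over the lines, one per possible protocol name in a fixed pre-sorted order (the detect_protocol alphabet is finite), so there is no dictionary and no sort at all.
import Mathlib
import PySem

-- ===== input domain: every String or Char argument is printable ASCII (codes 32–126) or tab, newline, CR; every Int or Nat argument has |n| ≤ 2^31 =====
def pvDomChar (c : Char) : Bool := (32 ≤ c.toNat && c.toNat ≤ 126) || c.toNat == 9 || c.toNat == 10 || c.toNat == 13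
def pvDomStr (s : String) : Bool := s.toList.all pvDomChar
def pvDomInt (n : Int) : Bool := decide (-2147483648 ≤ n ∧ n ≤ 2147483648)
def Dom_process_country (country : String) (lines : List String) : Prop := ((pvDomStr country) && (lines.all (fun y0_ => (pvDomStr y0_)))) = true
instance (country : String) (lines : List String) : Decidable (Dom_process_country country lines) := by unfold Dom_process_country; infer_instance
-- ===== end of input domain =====

-- B replaces A's bucket-dict-then-emit passes with one fixed-order filter pass per possible
-- protocol name (the detect_protocol alphabet is finite and pre-sorted); no dict, no sort.


-- ===== PORT A =====
-- the 'for p in [...]: if l.startswith(p): return …' loop, shared verbatim by Source A and Source B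
def detectLoop (l : String) : List String → String
  | [] => "other"
  | p :: ps => if PySem.Str.startswith l p then PySem.Str.replace p "://" "" else detectLoop l ps

def detect_protocol (line : String) : String :=
  detectLoop (PySem.Str.lower line)
    ["vmess://", "vless://", "trojan://", "ss://", "ssr://",
     "hy2://", "hysteria2://", "tuic://", "wireguard://", "wg://", "socks://"]

def process_country (country : String) (lines : List String) : List String :=
  let proto_map : PySem.Dict String (List String) :=
    lines.foldl (fun d line => d.modify (detect_protocol line) [] (fun b => b ++ [line]))
      PySem.Dict.empty
  (PySem.List.sorted proto_map.keys (fun k => k) false).foldl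
    (fun out proto => (proto_map.getD proto []).foldl (fun out line => out ++ [line]) out) []

-- ===== PORT B =====
-- Source B's _ORDER: every value detect_protocol can return, in alphabetical order
def protoOrder : List String :=
  ["hy2", "hysteria2", "other", "socks", "ss", "ssr",
   "trojan", "tuic", "vless", "vmess", "wg", "wireguard"]

def process_country_alt (country : String) (lines : List String) : List String :=
  protoOrder.foldl
    (fun out proto =>
      lines.foldl (fun out line => if detect_protocol line == proto then out ++ [line] else out) out)
    []

-- ===== PRECONDITION & SPEC =====
def Spec_process_country (country : String) (lines : List String) (out : List String) : Prop := out = process_country_alt country lines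
instance (country : String) (lines : List String) (out : List String) : Decidable (Spec_process_country country lines out) := by unfold Spec_process_country; infer_instance

-- ===== CLAIM (what is proved, stated in full; the proofs are below) =====
def Claim_equal_process_country : Prop := ∀ (country : String) (lines : List String), Dom_process_country country lines → Spec_process_country country lines (process_country country lines)

-- ===== LEMMAS AND PROOFS =====

-- protoOrder is strictly increasing
theorem protoOrder_pairwise : protoOrder.Pairwise (· < ·) := by
  have hc : List.IsChain (· < ·) protoOrder := by
    simp only [protoOrder, List.isChain_cons, List.isChain_nil, String.lt_iff_toList_lt]
    decide
  exact hc.pairwise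

-- detect_protocol only ever returns a name from protoOrder
set_option maxHeartbeats 2000000 in
theorem detect_mem (line : String) : detect_protocol line ∈ protoOrder := by
  show detectLoop (PySem.Str.lower line) _ ∈ _
  simp only [detectLoop]
  split_ifs <;> decide

-- inserting x into a key-sorted acc appends x after acc's elements of its own key:
-- the (key == k)-filter gains exactly x at the end
theorem filter_insertBy (key : String → String) (k x : String) :
    ∀ (acc : List String), acc.Pairwise (fun a b => key a ≤ key b) →
    (PySem.List.insertBy (fun a b => decide (key a < key b)) x acc).filter (fun y => key y == k)
      = acc.filter (fun y => key y == k) ++ (if key x == k then [x] else []) := by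
  intro acc hp
  induction acc with
  | nil =>
    show List.filter _ [x] = _
    by_cases hk : (key x == k) = true <;> simp [hk]
  | cons y t ih =>
    have hyt : ∀ z ∈ t, key y ≤ key z := fun z hz => List.rel_of_pairwise_cons hp hz
    have hpt : t.Pairwise (fun a b => key a ≤ key b) := hp.of_cons
    rw [show PySem.List.insertBy (fun a b => decide (key a < key b)) x (y :: t)
        = if decide (key x < key y) then x :: y :: t
          else y :: PySem.List.insertBy (fun a b => decide (key a < key b)) x t from rfl]
    by_cases hlt : key x < key y
    · rw [if_pos (by simpa using hlt)]
      by_cases hk : (key x == k) = true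
      · have hkx : key x = k := by simpa using hk
        have hnil : (y :: t).filter (fun z => key z == k) = [] := by
          rw [List.filter_eq_nil_iff]
          intro z hz
          have hzge : key y ≤ key z := by
            rcases List.mem_cons.mp hz with h | h
            · exact h ▸ le_refl _
            · exact hyt z h
          have hzk : k < key z := lt_of_lt_of_le (hkx ▸ hlt) hzge
          simp only [beq_iff_eq]
          exact fun e => absurd (e ▸ hzk) (lt_irrefl _)
        rw [List.filter_cons, if_pos hk, hnil, if_pos hk]
        rfl
      · rw [List.filter_cons, if_neg hk, if_neg hk, List.append_nil]
    · rw [if_neg (by simpa using hlt), List.filter_cons, List.filter_cons, ih hpt]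
      split_ifs <;> simp

-- stability of the stable sort, bucket by bucket: sorting does not change any key-filter
theorem filter_sorted (key : String → String) (k : String) (xs : List String) :
    (PySem.List.sorted xs key false).filter (fun y => key y == k)
      = xs.filter (fun y => key y == k) := by
  induction xs using List.reverseRecOn with
  | nil => rfl
  | append_singleton xs x ih =>
    have hs : PySem.List.sorted (xs ++ [x]) key false
        = PySem.List.insertBy (fun a b => decide (key a < key b)) x
            (PySem.List.sorted xs key false) := by
      rw [PySem.List.sorted_eq_foldl_insertBy, PySem.List.sorted_eq_foldl_insertBy,
        List.foldl_append]
      rfl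
    rw [hs, filter_insertBy key k x _ (PySem.List.sorted_pairwise xs key),
      List.filter_append, ih]
    by_cases hk : (key x == k) = true <;> simp [hk]

-- a key-sorted list whose keys all dominate k splits off its k-bucket as a prefix
theorem sorted_split (key : String → String) (k : String) :
    ∀ (ys : List String), ys.Pairwise (fun a b => key a ≤ key b) →
    (∀ x ∈ ys, k ≤ key x) →
    ys = ys.filter (fun y => key y == k) ++ ys.filter (fun y => !(key y == k)) := by
  intro ys hp hmin
  induction ys with
  | nil => rfl
  | cons y t ih =>
    have hyt : ∀ z ∈ t, key y ≤ key z := fun z hz => List.rel_of_pairwise_cons hp hz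
    have hpt : t.Pairwise (fun a b => key a ≤ key b) := hp.of_cons
    by_cases hy : (key y == k) = true
    · have ht := ih hpt (fun x hx => hmin x (List.mem_cons_of_mem _ hx))
      rw [List.filter_cons, List.filter_cons, if_pos hy,
        if_neg (by simp [hy]), List.cons_append]
      exact congrArg (y :: ·) ht
    · have hky : k < key y :=
        lt_of_le_of_ne (hmin y List.mem_cons_self)
          (fun e => hy (by simp [e.symm]))
      have hgt : ∀ z ∈ y :: t, k < key z := by
        intro z hz
        rcases List.mem_cons.mp hz with h | h
        · exact h ▸ hky
        · exact lt_of_lt_of_le hky (hyt z h)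
      have h1 : (y :: t).filter (fun z => key z == k) = [] := by
        rw [List.filter_eq_nil_iff]
        intro z hz
        simp only [beq_iff_eq]
        exact fun e => absurd (e ▸ hgt z hz) (lt_irrefl _)
      have h2 : (y :: t).filter (fun z => !(key z == k)) = y :: t := by
        rw [List.filter_eq_self]
        intro z hz
        simp only [Bool.not_eq_eq_eq_not, Bool.not_true, beq_eq_false_iff_ne, ne_eq]
        exact fun e => absurd (e ▸ hgt z hz) (lt_irrefl _)
      rw [h1, h2, List.nil_append]

-- a key-sorted list is the concatenation of its buckets over any strictly increasing
-- key list covering all its keys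
theorem bucket_decomp (key : String → String) :
    ∀ (ks ys : List String), ys.Pairwise (fun a b => key a ≤ key b) →
    ks.Pairwise (· < ·) → (∀ x ∈ ys, key x ∈ ks) →
    ys = ks.flatMap (fun k => ys.filter (fun y => key y == k)) := by
  intro ks
  induction ks with
  | nil =>
    intro ys _ _ hmem
    have hnil : ys = [] := by
      rw [List.eq_nil_iff_forall_not_mem]
      intro x hx; exact absurd (hmem x hx) List.not_mem_nil
    simp [hnil]
  | cons k ks ih =>
    intro ys hp hks hmem
    have hkks : ∀ j ∈ ks, k < j := fun j hj => List.rel_of_pairwise_cons hks hj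
    have hmin : ∀ x ∈ ys, k ≤ key x := by
      intro x hx
      rcases List.mem_cons.mp (hmem x hx) with e | hm
      · exact e ▸ le_refl _
      · exact le_of_lt (hkks _ hm)
    have hbuckets : ∀ j ∈ ks,
        ys.filter (fun y => key y == j)
          = (ys.filter (fun y => !(key y == k))).filter (fun y => key y == j) := by
      intro j hj
      have hjk : j ≠ k := fun e => absurd (e ▸ hkks j hj) (lt_irrefl _)
      rw [List.filter_filter]
      apply List.filter_congr
      intro z _
      by_cases hz : (key z == j) = true
      · have hzj : key z = j := by simpa using hz
        simp [hzj, hjk]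
      · simp [hz]
    have hrest := ih (ys.filter (fun y => !(key y == k)))
      (hp.filter _) hks.of_cons
      (by
        intro x hx
        have hxm : x ∈ ys := List.mem_of_mem_filter hx
        have hxk : (key x == k) ≠ true := by
          have := List.of_mem_filter hx
          simpa using this
        rcases List.mem_cons.mp (hmem x hxm) with e | hm
        · exact absurd (by simp [e]) hxk
        · exact hm)
    rw [List.flatMap_cons]
    conv_lhs => rw [sorted_split key k ys hp hmin]
    congr 1
    rw [List.flatMap_congr hbuckets]
    exact hrest

-- the stable key-sort in bucket normal form
theorem sorted_eq_flatMap (key : String → String) (xs : List String) :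
    PySem.List.sorted xs key false
      = (PySem.List.sorted (PySem.Set.ofList (xs.map key)) (fun k => k) false).flatMap
          (fun k => xs.filter (fun y => key y == k)) := by
  have hks : (PySem.List.sorted (PySem.Set.ofList (xs.map key)) (fun k => k) false).Pairwise (· < ·) :=
    PySem.List.sorted_ofList_pairwise_lt (xs.map key)
  have hmem : ∀ x ∈ PySem.List.sorted xs key false,
      key x ∈ PySem.List.sorted (PySem.Set.ofList (xs.map key)) (fun k => k) false := by
    intro x hx
    rw [PySem.List.mem_sorted] at hx ⊢
    rw [PySem.Set.mem_ofList]
    exact List.mem_map_of_mem hx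
  have h := bucket_decomp key
    (PySem.List.sorted (PySem.Set.ofList (xs.map key)) (fun k => k) false)
    (PySem.List.sorted xs key false)
    (PySem.List.sorted_pairwise xs key) hks hmem
  rw [h]
  simp only [filter_sorted]

-- A in the same normal form
theorem a_eq_flatMap (c : String) (xs : List String) :
    process_country c xs
      = (PySem.List.sorted (PySem.Set.ofList (xs.map detect_protocol)) (fun k => k) false).flatMap
          (fun k => xs.filter (fun y => detect_protocol y == k)) := by
  unfold process_country
  have hkeys : (xs.foldl (fun d line => d.modify (detect_protocol line) [] (fun b => b ++ [line]))
      (PySem.Dict.empty : PySem.Dict String (List String))).keys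
      = PySem.Set.ofList (xs.map detect_protocol) := by
    rw [PySem.Dict.keys_foldl_modify_key]
    simp [PySem.Set.update_nil_left]
  have hgetD : ∀ kk, (xs.foldl (fun d line => d.modify (detect_protocol line) [] (fun b => b ++ [line]))
      (PySem.Dict.empty : PySem.Dict String (List String))).getD kk []
      = xs.filter (fun y => detect_protocol y == kk) := by
    intro kk
    rw [show (xs.foldl (fun d line => d.modify (detect_protocol line) [] (fun b => b ++ [line]))
        (PySem.Dict.empty : PySem.Dict String (List String)))
        = ((xs.map (fun x => (detect_protocol x, x))).foldl
            (fun d p => d.modify p.1 [] (fun b => b ++ [p.2])) PySem.Dict.empty) from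
      by rw [List.foldl_map]]
    rw [PySem.Dict.getD_foldl_modify_append]
    rw [List.filter_map, List.map_map]
    simp [Function.comp_def]
  simp only [hkeys, hgetD, PySem.List.foldl_append_singleton_eq_self]
  rw [PySem.List.foldl_append_eq_flatMap]
  rfl

-- B in bucket normal form over the full fixed alphabet
theorem b_eq_flatMap (c : String) (xs : List String) :
    process_country_alt c xs
      = protoOrder.flatMap (fun k => xs.filter (fun y => detect_protocol y == k)) := by
  unfold process_country_alt
  simp only [PySem.List.foldl_append_if_eq_filter]
  rw [PySem.List.foldl_append_eq_flatMap]
  rfl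

-- ===== VERDICT (by name: the statement is the Claim_ definition above) =====
theorem process_country_spec : Claim_equal_process_country := by
  intro c xs _
  unfold Spec_process_country
  rw [a_eq_flatMap c xs, ← sorted_eq_flatMap detect_protocol xs, b_eq_flatMap c xs]
  have hys := bucket_decomp detect_protocol protoOrder
    (PySem.List.sorted xs detect_protocol false)
    (PySem.List.sorted_pairwise xs detect_protocol)
    protoOrder_pairwise
    (fun x _ => detect_mem x)
  rw [hys]
  simp only [filter_sorted]
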